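-- pv_equiv track=rewrite | github.com/nynynakazawa/RealTime-IBI-BP_Analysis-Pipeline | run_arob_tracking_autotune.py | _lag_mode_from_candidates
-- ===== SOURCE A (Python) =====
-- def _lag_mode_from_candidates(candidates: tuple[int, ...] | None) -> str:
--     if candidates is None:
--         return "base"
--     options = {
--         "wide": (-6, -5, -4, -3, -2, -1, 0, 1, 2, 3, 4, 5, 6),
--         "med": (-4, -3, -2, -1, 0, 1, 2, 3, 4),
--         "narrow": (-3, -2, -1, 0, 1, 2, 3),
--         "xnarrow": (-2, -1, 0, 1, 2),
--     }
--     for mode, values in options.items():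
--         if tuple(candidates) == values:
--             return mode
--     return "base"
-- ===== SOURCE B (Python) =====
-- def _lag_mode_from_candidates(candidates):
--     if candidates is None:
--         return "base"
--     t = tuple(candidates)
--     modes = {6: "wide", 4: "med", 3: "narrow", 2: "xnarrow"}
--     n = len(t) // 2
--     if len(t) % 2 == 1 and n in modes and t == tuple(range(-n, n + 1)):
--         return modes[n]
--     return "base"
-- ===== Notes on version B (the rewrite author's own statement) =====
-- stated objective: simpler
-- what changed: Instead of scanning a table of four hardcoded candidate tuples, B reconstructs the expected symmetric range from the tuple's length and looks the half-width up in a compact half-width-to-mode map.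
import Mathlib
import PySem

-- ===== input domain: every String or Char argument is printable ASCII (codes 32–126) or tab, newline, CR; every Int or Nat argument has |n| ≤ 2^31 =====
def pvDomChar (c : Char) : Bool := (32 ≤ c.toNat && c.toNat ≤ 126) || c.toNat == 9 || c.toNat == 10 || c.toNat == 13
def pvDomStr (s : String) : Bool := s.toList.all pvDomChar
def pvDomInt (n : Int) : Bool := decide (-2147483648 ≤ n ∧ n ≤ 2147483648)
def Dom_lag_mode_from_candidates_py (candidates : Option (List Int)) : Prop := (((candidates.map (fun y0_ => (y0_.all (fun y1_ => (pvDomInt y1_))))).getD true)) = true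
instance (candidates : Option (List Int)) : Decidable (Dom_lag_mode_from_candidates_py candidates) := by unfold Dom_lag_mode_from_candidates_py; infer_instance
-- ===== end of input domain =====

-- B replaces A's scan over four hardcoded candidate tuples by reconstructing the
-- expected symmetric range from the length and a compact half-width → mode map (simpler).

-- ===== PORT A =====
-- the 'for mode, values in options.items()' loop with early return
def lagModeLoopA (c : List Int) : List (String × List Int) → String
  | [] => "base"
  | (mode, values) :: rest => if c = values then mode else lagModeLoopA c rest

def lag_mode_from_candidates_py (candidates : Option (List Int)) : String :=
  match candidates with
  | none => "base"
  | some c =>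
      let options : List (String × List Int) :=
        [("wide", [-6, -5, -4, -3, -2, -1, 0, 1, 2, 3, 4, 5, 6]),
         ("med", [-4, -3, -2, -1, 0, 1, 2, 3, 4]),
         ("narrow", [-3, -2, -1, 0, 1, 2, 3]),
         ("xnarrow", [-2, -1, 0, 1, 2])]
      lagModeLoopA c options

-- ===== PORT B =====
def lagModesB : PySem.Dict Int String :=
  PySem.Dict.ofList [(6, "wide"), (4, "med"), (3, "narrow"), (2, "xnarrow")]

def lag_mode_from_candidates_py_alt (candidates : Option (List Int)) : String :=
  match candidates with
  | none => "base"
  | some t =>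
      let n : Int := PySem.Int.floordiv (Int.ofNat t.length) 2
      if PySem.Int.mod (Int.ofNat t.length) 2 = 1 ∧ (lagModesB.get? n).isSome
          ∧ t = PySem.List.pyRange (-n) (n + 1) 1 then
        lagModesB.getD n "base"   -- guarded: get? n is some here, so this is modes[n]
      else "base"

-- ===== PRECONDITION & SPEC =====
def Spec_lag_mode_from_candidates_py (candidates : Option (List Int)) (out : String) : Prop := out = lag_mode_from_candidates_py_alt candidates
instance (candidates : Option (List Int)) (out : String) : Decidable (Spec_lag_mode_from_candidates_py candidates out) := by unfold Spec_lag_mode_from_candidates_py; infer_instance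

-- ===== CLAIM (what is proved, stated in full; the proofs are below) =====
def Claim_equal_lag_mode_from_candidates_py : Prop := ∀ (candidates : Option (List Int)), Dom_lag_mode_from_candidates_py candidates → Spec_lag_mode_from_candidates_py candidates (lag_mode_from_candidates_py candidates)

-- ===== LEMMAS AND PROOFS =====

-- the only keys of B's map
lemma lagModesB_keys (n : Int) (h : (lagModesB.get? n).isSome) :
    n = 6 ∨ n = 4 ∨ n = 3 ∨ n = 2 := by
  have hm : lagModesB = PySem.Dict.mk [(6, "wide"), (4, "med"), (3, "narrow"), (2, "xnarrow")] := by
    decide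
  rw [hm] at h
  simp only [PySem.Dict.get?_mk_cons] at h
  split_ifs at h with a b c d
  · exact Or.inl (beq_iff_eq.mp a).symm
  · exact Or.inr (Or.inl (beq_iff_eq.mp b).symm)
  · exact Or.inr (Or.inr (Or.inl (beq_iff_eq.mp c).symm))
  · exact Or.inr (Or.inr (Or.inr (beq_iff_eq.mp d).symm))
  · simp [PySem.Dict.get?] at h

-- ===== VERDICT (by name: the statement is the Claim_ definition above) =====
theorem lag_mode_from_candidates_py_spec : Claim_equal_lag_mode_from_candidates_py := by
  intro candidates _
  unfold Spec_lag_mode_from_candidates_py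
  match candidates with
  | none => rfl
  | some c =>
    by_cases h1 : c = [-6, -5, -4, -3, -2, -1, 0, 1, 2, 3, 4, 5, 6]
    · subst h1; decide
    by_cases h2 : c = [-4, -3, -2, -1, 0, 1, 2, 3, 4]
    · subst h2; decide
    by_cases h3 : c = [-3, -2, -1, 0, 1, 2, 3]
    · subst h3; decide
    by_cases h4 : c = [-2, -1, 0, 1, 2]
    · subst h4; decide
    -- neither literal: A returns "base"; show B's guard is false
    simp only [lag_mode_from_candidates_py, lag_mode_from_candidates_py_alt,
      lagModeLoopA, if_neg h1, if_neg h2, if_neg h3, if_neg h4]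
    rw [if_neg]
    rintro ⟨-, hsome, hrange⟩
    rcases lagModesB_keys _ hsome with h | h | h | h <;> rw [h] at hrange <;>
      first
        | exact h1 (by simpa [PySem.List.pyRange] using hrange)
        | exact h2 (by simpa [PySem.List.pyRange] using hrange)
        | exact h3 (by simpa [PySem.List.pyRange] using hrange)
        | exact h4 (by simpa [PySem.List.pyRange] using hrange)
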